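-- pv_equiv track=rewrite | github.com/bale2manos/feb_scraper | scrapers/scrape_clutch_lineup.py | teams_in_game
-- ===== SOURCE A (Python) =====
-- from typing import Dict, List, Optional, Tuple, Set
--
-- def teams_in_game(rows: List[Dict]) -> List[str]:
--     ts = []
--     for r in rows:
--         t = r.get("team")
--         if t and t not in ts:
--             ts.append(t)
--         if len(ts) == 2:
--             break
--     return ts
-- ===== SOURCE B (Python) =====
-- def teams_in_game(rows):
--     names = [r.get("team") for r in rows]
--     first = next((t for t in names if t), None)
--     if first is None:
--         return []
--     second = next((t for t in names if t and t != first), None)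
--     return [first] if second is None else [first, second]
-- ===== Notes on version B (the rewrite author's own statement) =====
-- stated objective: alternative
-- what changed: Replaces A's single-pass size-capped dedup accumulator (membership test + break) with two staged searches: first scan finds the first truthy team name, a second scan finds the first truthy name different from it; no accumulator or membership structure is kept.
import Mathlib
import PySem

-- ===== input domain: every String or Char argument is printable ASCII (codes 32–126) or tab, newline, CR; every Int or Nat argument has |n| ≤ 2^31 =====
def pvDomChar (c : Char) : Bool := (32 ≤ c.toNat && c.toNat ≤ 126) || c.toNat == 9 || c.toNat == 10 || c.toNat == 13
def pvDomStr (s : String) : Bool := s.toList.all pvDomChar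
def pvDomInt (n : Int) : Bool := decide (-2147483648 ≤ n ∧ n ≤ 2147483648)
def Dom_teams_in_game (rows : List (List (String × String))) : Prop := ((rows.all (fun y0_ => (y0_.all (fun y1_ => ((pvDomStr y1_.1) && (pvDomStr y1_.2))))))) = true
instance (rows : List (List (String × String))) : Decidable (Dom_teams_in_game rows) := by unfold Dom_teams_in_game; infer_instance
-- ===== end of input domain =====

-- B replaces A's size-capped dedup accumulator with two staged searches (first truthy team name,
-- then first truthy name different from it); same return value, stated as exact equivalence.


-- ===== PORT A =====
-- the loop of A: accumulator ts, append unseen non-empty team, break when len(ts) == 2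
def teamsGoA : List (List (String × String)) → List String → List String
  | [], ts => ts
  | r :: rest, ts =>
    let ts' := match (PySem.Dict.mk r).get? "team" with
      | some t => if t ≠ "" ∧ t ∉ ts then ts ++ [t] else ts
      | none => ts
    if ts'.length = 2 then ts' else teamsGoA rest ts'

def teams_in_game (rows : List (List (String × String))) : List String :=
  teamsGoA rows []

-- ===== PORT B =====
-- B: map out the names, then two staged searches; a name is 'truthy' iff present and non-empty,
-- which is exactly '(o.getD "") ≠ ""' on the Option.
def teams_in_game_alt (rows : List (List (String × String))) : List String :=
  let names := rows.map (fun r => (PySem.Dict.mk r).get? "team")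
  match names.find? (fun o => decide (o.getD "" ≠ "")) with
  | none => []
  | some o₁ =>
    let first := o₁.getD ""
    match names.find? (fun o => decide (o.getD "" ≠ "" ∧ o.getD "" ≠ first)) with
    | none => [first]
    | some o₂ => [first, o₂.getD ""]

-- ===== PRECONDITION & SPEC =====
def Spec_teams_in_game (rows : List (List (String × String))) (out : List String) : Prop := out = teams_in_game_alt rows
instance (rows : List (List (String × String))) (out : List String) : Decidable (Spec_teams_in_game rows out) := by unfold Spec_teams_in_game; infer_instance

-- ===== CLAIM =====
def Claim_equal_teams_in_game : Prop := ∀ (rows : List (List (String × String))), Dom_teams_in_game rows → Spec_teams_in_game rows (teams_in_game rows)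

-- ===== LEMMAS AND PROOFS =====

-- the filtered-name extractor both sides are about
def pvGood (o : Option String) : Bool := decide (o.getD "" ≠ "")
def pvH (o : Option String) : Option String := o.bind (fun t => if t = "" then none else some t)

theorem pvH_eq (o : Option String) : pvH o = if pvGood o then some (o.getD "") else none := by
  cases o with
  | none => simp [pvH, pvGood]
  | some t => by_cases h : t = "" <;> simp [pvH, pvGood, h]

-- the accumulator is a prefix of any further Set.add fold
theorem prefix_foldl_add (l : List String) (ts : List String) :
    ts <+: l.foldl PySem.Set.add ts := by
  induction l generalizing ts with
  | nil => exact List.prefix_refl ts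
  | cons x xs ih =>
    refine List.IsPrefix.trans ?_ (ih (PySem.Set.add ts x))
    unfold PySem.Set.add
    split
    · exact List.prefix_refl ts
    · exact ⟨[x], rfl⟩

theorem take_of_prefix_len {l₁ l₂ : List String} (h : l₁ <+: l₂) :
    l₂.take l₁.length = l₁ := by
  obtain ⟨t, rfl⟩ := h
  simp

-- A-side invariant: the loop from a short accumulator computes take 2 of the Set.add fold
theorem teamsGoA_eq (rows : List (List (String × String))) (ts : List String)
    (h : ts.length ≤ 1) :
    teamsGoA rows ts =
      ((rows.filterMap (fun r => pvH ((PySem.Dict.mk r).get? "team"))).foldl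
          PySem.Set.add ts).take 2 := by
  induction rows generalizing ts with
  | nil =>
    have : ts.length ≤ 2 := by omega
    simp [teamsGoA, List.take_of_length_le this]
  | cons r rest ih =>
    unfold teamsGoA
    cases hg : (PySem.Dict.mk r).get? "team" with
    | none =>
      have hlen : ¬ ts.length = 2 := by omega
      simp only [hg, List.filterMap_cons, pvH, Option.bind_none, hlen, if_false]
      exact ih ts h
    | some t =>
      by_cases ht : t = ""
      · subst ht
        have hlen : ¬ ts.length = 2 := by omega
        simp only [hg, List.filterMap_cons, pvH, Option.bind_some,
          ne_eq, not_true_eq_false, false_and, if_false, hlen]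
        exact ih ts h
      · simp only [hg, List.filterMap_cons, pvH, Option.bind_some, if_neg ht,
          List.foldl_cons]
        have hadd : PySem.Set.add ts t = if t ≠ "" ∧ t ∉ ts then ts ++ [t] else ts := by
          unfold PySem.Set.add
          by_cases hm : t ∈ ts
          · simp [PySem.Set.contains, hm, ht]
          · simp [PySem.Set.contains, hm, ht]
        rw [← hadd]
        by_cases h2 : (PySem.Set.add ts t).length = 2
        · rw [if_pos h2]
          have hp := prefix_foldl_add (rest.filterMap (fun r =>
            pvH ((PySem.Dict.mk r).get? "team"))) (PySem.Set.add ts t)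
          rw [← h2]
          exact (take_of_prefix_len hp).symm
        · rw [if_neg h2]
          have hle : (PySem.Set.add ts t).length ≤ 1 := by
            have : (PySem.Set.add ts t).length ≤ ts.length + 1 := by
              unfold PySem.Set.add; split <;> simp
            omega
          exact ih _ hle

-- B-side: the first staged search is head? of the filtered names
theorem find_good_eq (names : List (Option String)) :
    (names.find? pvGood).map (fun o => o.getD "") = (names.filterMap pvH).head? := by
  induction names with
  | nil => simp
  | cons o rest ih =>
    by_cases hg : pvGood o = true
    · rw [List.find?_cons_of_pos hg, List.filterMap_cons, pvH_eq, if_pos hg]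
      simp
    · rw [List.find?_cons_of_neg hg, List.filterMap_cons, pvH_eq, if_neg hg, ih]

-- B-side: the second staged search is find? (≠ f) on the filtered names
theorem find_good_ne_eq (names : List (Option String)) (f : String) :
    (names.find? (fun o => decide (o.getD "" ≠ "" ∧ o.getD "" ≠ f))).map (fun o => o.getD "")
      = (names.filterMap pvH).find? (fun t => decide (t ≠ f)) := by
  induction names with
  | nil => simp
  | cons o rest ih =>
    by_cases hg : pvGood o = true
    · have hgood : o.getD "" ≠ "" := of_decide_eq_true hg
      by_cases hf : o.getD "" = f
      · rw [List.find?_cons_of_neg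
            (p := fun o : Option String => decide (o.getD "" ≠ "" ∧ o.getD "" ≠ f)) (by simp [hf]),
          List.filterMap_cons, pvH_eq, if_pos hg,
          List.find?_cons_of_neg (p := fun t : String => decide (t ≠ f)) (by simp [hf]), ih]
      · rw [List.find?_cons_of_pos
            (p := fun o : Option String => decide (o.getD "" ≠ "" ∧ o.getD "" ≠ f))
            (by simp [hf, hgood]),
          List.filterMap_cons, pvH_eq, if_pos hg,
          List.find?_cons_of_pos (p := fun t : String => decide (t ≠ f)) (by simp [hf])]
        simp
    · have hgood : o.getD "" = "" := by
        by_contra hne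
        exact hg (decide_eq_true hne)
      rw [List.find?_cons_of_neg
          (p := fun o : Option String => decide (o.getD "" ≠ "" ∧ o.getD "" ≠ f)) (by simp [hgood]),
        List.filterMap_cons, pvH_eq, if_neg hg, ih]

-- take 2 of the Set.add fold from a one-element accumulator is 'f, then the first element ≠ f'
theorem take2_foldl_add (rest : List String) (f : String) :
    (rest.foldl PySem.Set.add [f]).take 2
      = f :: (rest.find? (fun t => decide (t ≠ f))).toList := by
  induction rest with
  | nil => simp
  | cons x rest' ih =>
    by_cases hx : x = f
    · subst hx
      have hadd : PySem.Set.add [x] x = [x] := by simp [PySem.Set.add, PySem.Set.contains]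
      rw [List.foldl_cons, hadd,
        List.find?_cons_of_neg (p := fun t : String => decide (t ≠ x)) (by simp), ih]
    · have hadd : PySem.Set.add [f] x = [f, x] := by
        simp [PySem.Set.add, PySem.Set.contains, hx]
      have hp := prefix_foldl_add rest' [f, x]
      have htake := take_of_prefix_len hp
      simp only [List.length_cons, List.length_nil] at htake
      rw [List.foldl_cons, hadd, htake,
        List.find?_cons_of_pos (p := fun t : String => decide (t ≠ f)) (by simp [hx])]
      simp

-- B's staged searches, on an arbitrary name list, compute take 2 of the Set.add fold
theorem altEq (names : List (Option String)) :
    ((names.filterMap pvH).foldl PySem.Set.add []).take 2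
      = (match names.find? pvGood with
         | none => []
         | some o₁ =>
           match names.find? (fun o => decide (o.getD "" ≠ "" ∧ o.getD "" ≠ o₁.getD "")) with
           | none => [o₁.getD ""]
           | some o₂ => [o₁.getD "", o₂.getD ""]) := by
  have h1 := find_good_eq names
  cases hL : names.filterMap pvH with
  | nil =>
    rw [hL] at h1
    simp only [List.head?_nil, Option.map_eq_none_iff] at h1
    rw [h1]
    simp
  | cons f restL =>
    rw [hL] at h1
    simp only [List.head?_cons, Option.map_eq_some_iff] at h1
    obtain ⟨o₁, hfind, hfirst⟩ := h1
    rw [hfind]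
    simp only [hfirst]
    have h2 := find_good_ne_eq names f
    rw [hL, List.find?_cons_of_neg (p := fun t : String => decide (t ≠ f)) (by simp)] at h2
    rw [List.foldl_cons, show PySem.Set.add [] f = [f] by
        simp [PySem.Set.add, PySem.Set.contains],
      take2_foldl_add restL f, ← h2]
    cases names.find? (fun o => decide (o.getD "" ≠ "" ∧ o.getD "" ≠ f)) <;> simp

-- ===== VERDICT =====
theorem teams_in_game_spec : Claim_equal_teams_in_game := by
  intro rows _
  unfold Spec_teams_in_game teams_in_game teams_in_game_alt
  rw [teamsGoA_eq rows [] (by simp)]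
  have hmap : rows.filterMap (fun r => pvH ((PySem.Dict.mk r).get? "team"))
      = (rows.map (fun r => (PySem.Dict.mk r).get? "team")).filterMap pvH := by
    rw [List.filterMap_map]; rfl
  rw [hmap]
  exact altEq (rows.map (fun r => (PySem.Dict.mk r).get? "team"))
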